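-- pv_equiv track=rewrite | github.com/mdafsheen06/ai-logger | src/analyzer.py | extract_error_windows
-- ===== SOURCE A (Python) =====
-- from typing import List, Tuple, Dict
--
-- ERROR_KEYS = ["error", "exception", "traceback", "failed", "timeout", "fatal", "panic", "stack", "500", " 4xx ", " 5xx ", "warn", "warning", "performance", "resultsCount:0", "high value", "large", "slow", "cart limit", "search", "inventory", "stock", "checkout", "order", "transaction"]
--
-- MAX_PROMPT_CHARS = 8000
--
-- def extract_error_windows(text: str) -> Tuple[str, List[str]]:
--     """Extract error patterns and create analysis windows."""
--     lines = text.splitlines()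
--
--     # Get the last error (most recent)
--     error_lines = []
--     for idx, line in enumerate(lines):
--         if "ERROR" in line or "error" in line.lower():
--             error_lines.append(f"Line {idx + 1}: {line}")
--
--     last_error = ""
--     if error_lines:
--         last_error = error_lines[-1]  # Last error found
--
--     # Create structured analysis
--     analysis = f"""
-- LAST ERROR FOUND:
-- {last_error}
--
-- LOG CONTENT FOR ANALYSIS:
-- {text[:MAX_PROMPT_CHARS]}
-- """
--
--     patterns = summarize_patterns([ln.lower() for ln in lines])
--     return analysis, patterns
--
-- def summarize_patterns(lower_lines: List[str]) -> List[str]: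
--     """Summarize error patterns found in log lines."""
--     counts: Dict[str, int] = {}
--     for ln in lower_lines:
--         for k in ERROR_KEYS:
--             if k in ln:
--                 counts[k.strip()] = counts.get(k.strip(), 0) + 1
--     pairs = sorted(counts.items(), key=lambda x: x[1], reverse=True)
--     return [f"{k}:{v}" for k, v in pairs[:6]]
-- ===== SOURCE B (Python) =====
-- from typing import List, Tuple
--
-- ERROR_KEYS = ["error", "exception", "traceback", "failed", "timeout", "fatal", "panic", "stack", "500", " 4xx ", " 5xx ", "warn", "warning", "performance", "resultsCount:0", "high value", "large", "slow", "cart limit", "search", "inventory", "stock", "checkout", "order", "transaction"]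
--
-- MAX_PROMPT_CHARS = 8000
--
-- def extract_error_windows(text: str) -> Tuple[str, List[str]]:
--     """Decorate-sort-undecorate: keyword-outer counting, explicit tie-break key, no dict."""
--     lines = text.splitlines()
--     low = [ln.lower() for ln in lines]
--
--     last_error = ""
--     for i in reversed(range(len(lines))):
--         if "error" in low[i]:
--             last_error = f"Line {i + 1}: {lines[i]}"
--             break
--
--     stats = []
--     for j, k in enumerate(ERROR_KEYS):
--         hits = [i for i, ln in enumerate(low) if k in ln]
--         if hits:
--             stats.append((-len(hits), hits[0], j, k.strip()))
--     stats.sort()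
--
--     analysis = f"""
-- LAST ERROR FOUND:
-- {last_error}
--
-- LOG CONTENT FOR ANALYSIS:
-- {text[:MAX_PROMPT_CHARS]}
-- """
--     return analysis, [f"{name}:{-neg}" for neg, _, _, name in stats[:6]]
-- ===== Notes on version B (the rewrite author's own statement) =====
-- stated objective: alternative
-- what changed: Replaces A's line-outer dict counting plus stable reverse sort over dict insertion order with a decorate-sort-undecorate pipeline: keyword-outer counting building (-count, first_line, key_index, name) tuples, a plain ascending tuple sort with an explicit tie-break key, and a reverse scan with early break for the last error line instead of collecting all error lines.
import Mathlib
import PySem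

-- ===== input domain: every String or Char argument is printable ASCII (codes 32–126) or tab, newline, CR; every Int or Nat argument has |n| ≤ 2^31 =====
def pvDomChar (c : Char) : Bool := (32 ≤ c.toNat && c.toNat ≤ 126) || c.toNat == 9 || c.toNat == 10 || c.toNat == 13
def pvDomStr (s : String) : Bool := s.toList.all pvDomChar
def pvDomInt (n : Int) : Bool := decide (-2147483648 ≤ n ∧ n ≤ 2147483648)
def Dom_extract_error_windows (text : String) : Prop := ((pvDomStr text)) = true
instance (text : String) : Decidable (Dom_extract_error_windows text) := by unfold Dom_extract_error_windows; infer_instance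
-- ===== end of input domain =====

-- B is a decorate-sort-undecorate re-implementation: keyword-outer counting with an explicit
-- tie-break tuple (-count, first line, keyword index) instead of A's line-outer dict + stable
-- sort over insertion order, and a reverse scan with break for the last error; objective: alternative.

def ERROR_KEYS : List String := ["error", "exception", "traceback", "failed", "timeout", "fatal", "panic", "stack", "500", " 4xx ", " 5xx ", "warn", "warning", "performance", "resultsCount:0", "high value", "large", "slow", "cart limit", "search", "inventory", "stock", "checkout", "order", "transaction"]

-- ===== PORT A =====
def summarize_patterns (lower_lines : List String) : List String :=
  let counts : PySem.Dict String Int :=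
    lower_lines.foldl (fun d ln =>
      ERROR_KEYS.foldl (fun d k =>
        if PySem.Str.isIn k ln then
          d.insert (PySem.Str.strip k) (d.getD (PySem.Str.strip k) 0 + 1)
        else d) d)
      PySem.Dict.empty
  let pairs := PySem.List.sorted counts.items (fun x => x.2) true
  (pairs.take 6).map (fun p => p.1 ++ ":" ++ PySem.Int.toStr p.2)

def extract_error_windows (text : String) : String × List String :=
  let lines := PySem.Str.splitlines text
  let error_lines := (PySem.List.enumerate lines).foldl
    (fun acc p =>
      if PySem.Str.isIn "ERROR" p.2 || PySem.Str.isIn "error" (PySem.Str.lower p.2) then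
        acc ++ ["Line " ++ PySem.Int.toStr (p.1 + 1) ++ ": " ++ p.2]
      else acc) ([] : List String)
  let last_error := if error_lines.isEmpty then "" else (PySem.List.pyGet? error_lines (-1)).getD ""
  let analysis := "\nLAST ERROR FOUND:\n" ++ last_error ++ "\n\nLOG CONTENT FOR ANALYSIS:\n"
      ++ PySem.Str.slice text none (some 8000) ++ "\n"
  let patterns := summarize_patterns (lines.map PySem.Str.lower)
  (analysis, patterns)

-- ===== PORT B =====
-- Python's string '<' (lexicographic on code points), ported by hand on List Char; exact on every input
def chLt : List Char → List Char → Bool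
  | _, [] => false
  | [], _ :: _ => true
  | a :: as, b :: bs => if a < b then true else if b < a then false else chLt as bs

-- Python's tuple '<' on (-count, first, j, name): short-circuit lexicographic comparison, ported by hand; exact
def tupLt (x y : Int × Int × Int × String) : Bool :=
  if x.1 < y.1 then true else if y.1 < x.1 then false
  else if x.2.1 < y.2.1 then true else if y.2.1 < x.2.1 then false
  else if x.2.2.1 < y.2.2.1 then true else if y.2.2.1 < x.2.2.1 then false
  else chLt x.2.2.2.toList y.2.2.2.toList

def extract_error_windows_alt (text : String) : String × List String :=
  let lines := PySem.Str.splitlines text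
  let low := lines.map PySem.Str.lower
  -- for i in reversed(range(len(lines))): … break  — first hit in reverse order
  let last_error :=
    (((List.range lines.length).reverse).findSome? (fun (i : Nat) =>
        if PySem.Str.isIn "error" (PySem.List.pyGetD low (i : Int) "") then
          some ("Line " ++ PySem.Int.toStr ((i : Int) + 1) ++ ": " ++ PySem.List.pyGetD lines (i : Int) "")
        else none)).getD ""
  let stats := (PySem.List.enumerate ERROR_KEYS).foldl
    (fun (st : List (Int × Int × Int × String)) q =>
      let hits := ((PySem.List.enumerate low).filter (fun p => PySem.Str.isIn q.2 p.2)).map (fun p => p.1)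
      if !hits.isEmpty then
        st ++ [(-(PySem.List.len hits), PySem.List.pyGetD hits 0 0, q.1, PySem.Str.strip q.2)]
      else st) []
  -- stats.sort(): list.sort() is a stable ascending sort — ported by hand as stable insertion with tupLt
  let sorted_stats := stats.foldl (fun acc x => PySem.List.insertBy tupLt x acc) []
  let analysis := "\nLAST ERROR FOUND:\n" ++ last_error ++ "\n\nLOG CONTENT FOR ANALYSIS:\n"
      ++ PySem.Str.slice text none (some 8000) ++ "\n"
  (analysis, (sorted_stats.take 6).map (fun t => t.2.2.2 ++ ":" ++ PySem.Int.toStr (-t.1)))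

-- ===== PRECONDITION & SPEC =====
def Spec_extract_error_windows (text : String) (out : String × List String) : Prop := out = extract_error_windows_alt text
instance (text : String) (out : String × List String) : Decidable (Spec_extract_error_windows text out) := by unfold Spec_extract_error_windows; infer_instance

-- ===== CLAIM (what is proved, stated in full; the proofs are below) =====
def Claim_equal_extract_error_windows : Prop := ∀ (text : String), Dom_extract_error_windows text → Spec_extract_error_windows text (extract_error_windows text)

-- ===== LEMMAS AND PROOFS =====

-- ---------- proof-side abbreviations ----------
def SKS : List String := ERROR_KEYS.map PySem.Str.strip
def unstrip (s : String) : String := if s = "4xx" then " 4xx " else if s = "5xx" then " 5xx " else s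
def blk (ln : String) : List String := SKS.filter (fun s => PySem.Str.isIn (unstrip s) ln)
def occL (low : List String) : List String := low.flatMap blk
def auxN (low : List String) (s : String) : Nat :=
  low.findIdx (fun ln => PySem.Str.isIn (unstrip s) ln) * 25 + SKS.idxOf s
-- the strict order the final pattern list realises: count descending, then first occurrence
def Rrel (low : List String) (p q : String × Int) : Prop :=
  q.2 < p.2 ∨ (q.2 = p.2 ∧ auxN low p.1 < auxN low q.1)
def L3 (t u : Int × Int × Int × String) : Prop :=
  t.1 < u.1 ∨ (t.1 = u.1 ∧ (t.2.1 < u.2.1 ∨ (t.2.1 = u.2.1 ∧ t.2.2.1 < u.2.2.1)))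
def projP (t : Int × Int × Int × String) : String × Int := (t.2.2.2, -t.1)

-- ---------- part 1: the analysis string ----------
lemma cond_eq (line : String) :
    (PySem.Str.isIn "ERROR" line || PySem.Str.isIn "error" (PySem.Str.lower line))
      = PySem.Str.isIn "error" (PySem.Str.lower line) := by
  cases h : PySem.Str.isIn "ERROR" line with
  | false => simp
  | true =>
    have h1 : ("ERROR".toList) <:+: line.toList := (PySem.Str.isIn_iff_infix _ _).mp h
    have h2 := h1.map PySem.Chars.lowerChar
    have h3 : ("ERROR".toList.map PySem.Chars.lowerChar) = "error".toList := by decide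
    have h4 : PySem.Str.isIn "error" (PySem.Str.lower line) = true := by
      rw [PySem.Str.isIn_iff_infix]
      have hl : (PySem.Str.lower line).toList = line.toList.map PySem.Chars.lowerChar := by
        simp [PySem.Chars.lower]
      rw [hl, ← h3]; exact h2
    rw [Bool.true_or]; exact h4.symm

lemma last_track {γ : Type} (c : γ → Bool) (m : γ → String) :
    ∀ (l : List γ) (acc : List String) (s : String),
      (l.foldl (fun acc p => if c p then acc ++ [m p] else acc) acc).getLastD s
        = l.foldl (fun t p => if c p then m p else t) (acc.getLastD s) := by
  intro l
  induction l with
  | nil => intro acc s; rfl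
  | cons p t ih =>
    intro acc s
    simp only [List.foldl_cons]
    cases hc : c p with
    | false => simp only [Bool.false_eq_true, if_false]; exact ih acc s
    | true => simp only [if_true]; rw [ih (acc ++ [m p]) s, List.getLastD_concat]

lemma lastexpr (l : List String) :
    (if l.isEmpty then "" else (PySem.List.pyGet? l (-1)).getD "") = l.getLastD "" := by
  cases l with
  | nil => rfl
  | cons x xs =>
    have hg : PySem.List.pyGet? (x :: xs) (-1) = (x :: xs).getLast? := by
      simp [PySem.List.pyGet?, PySem.List.pyIdx?, List.getLast?_eq_getElem?]
    cases h : (x :: xs).getLast? with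
    | none => simp at h
    | some y => simp [hg, h, List.getLastD_eq_getLast?]

lemma findSome?_congr {α β : Type} (f g : α → Option β) (l : List α)
    (h : ∀ a ∈ l, f a = g a) : l.findSome? f = l.findSome? g := by
  induction l with
  | nil => rfl
  | cons x t ih =>
    simp only [List.findSome?_cons]
    rw [h x (List.mem_cons_self), ih (fun a ha => h a (List.mem_cons_of_mem _ ha))]

lemma revfind (c : String → Bool) (fmt : Int → String → String) (l : List String) :
    (((List.range l.length).reverse).findSome? (fun i =>
        if c (l.getD i "") then some (fmt (i : Int) (l.getD i "")) else none)).getD ""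
      = (PySem.List.enumerate l).foldl (fun t p => if c p.2 then fmt p.1 p.2 else t) "" := by
  induction l using List.reverseRecOn with
  | nil => rfl
  | append_singleton t x ih =>
    have hlen : (t ++ [x]).length = t.length + 1 := by simp
    have hx : (t ++ [x]).getD t.length "" = x := by
      simp [List.getD]
    have hlt : ∀ i ∈ (List.range t.length).reverse, (t ++ [x]).getD i "" = t.getD i "" := by
      intro i hi
      have : i < t.length := by simpa using hi
      simp [List.getD, List.getElem?_append_left this]
    have henum : PySem.List.enumerate (t ++ [x]) 0
        = PySem.List.enumerate t 0 ++ [((t.length : Int), x)] := by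
      rw [PySem.List.enumerate_append]; simp [PySem.List.enumerate]
    rw [hlen, List.range_succ, List.reverse_append, henum]
    simp only [List.reverse_cons, List.reverse_nil, List.nil_append, List.singleton_append,
      List.findSome?_cons, List.foldl_append, List.foldl_cons, List.foldl_nil]
    rw [hx]
    cases hc : c x with
    | true =>
      simp only [if_true, Option.getD_some]
    | false =>
      simp only [Bool.false_eq_true, if_false]
      rw [findSome?_congr _ _ _ (fun i hi => by rw [hlt i hi])]
      exact ih

-- ---------- part 2: decidable literal facts ----------
lemma sks_nodup : SKS.Nodup := by decide
lemma sks_len : SKS.length = 25 := by decide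
lemma unstrip_strip : ∀ k ∈ ERROR_KEYS, unstrip (PySem.Str.strip k) = k := by decide
lemma idx_strip : ∀ p ∈ PySem.List.enumerate ERROR_KEYS,
    ((SKS.idxOf (PySem.Str.strip p.2) : Int) = p.1) := by decide

lemma filter_map_strip (ln : String) :
    ∀ (l : List String), (∀ k ∈ l, unstrip (PySem.Str.strip k) = k) →
      (l.filter (fun k => PySem.Str.isIn k ln)).map PySem.Str.strip
        = (l.map PySem.Str.strip).filter (fun s => PySem.Str.isIn (unstrip s) ln) := by
  intro l
  induction l with
  | nil => intro _; rfl
  | cons k t ih =>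
    intro h
    have hk := h k (List.mem_cons_self)
    simp only [List.filter_cons, List.map_cons, hk]
    cases hc : PySem.Str.isIn k ln with
    | true =>
      simp only [if_true, List.map_cons]
      rw [ih (fun a ha => h a (List.mem_cons_of_mem _ ha))]
    | false =>
      simp only [Bool.false_eq_true, if_false]
      exact ih (fun a ha => h a (List.mem_cons_of_mem _ ha))

lemma blk_eq (ln : String) :
    (ERROR_KEYS.filter (fun k => PySem.Str.isIn k ln)).map PySem.Str.strip = blk ln := by
  unfold blk SKS
  exact filter_map_strip ln ERROR_KEYS unstrip_strip


lemma blk_nodup (ln : String) : (blk ln).Nodup := sks_nodup.filter _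

lemma mem_blk {s ln : String} : s ∈ blk ln ↔ s ∈ SKS ∧ PySem.Str.isIn (unstrip s) ln := by
  simp [blk, List.mem_filter]

lemma nodup_pairwise_idxOf (l : List String) (h : l.Nodup) :
    l.Pairwise (fun a b => l.idxOf a < l.idxOf b) := by
  induction l with
  | nil => exact List.Pairwise.nil
  | cons x t ih =>
    have hx : x ∉ t := (List.nodup_cons.mp h).1
    have ht : t.Nodup := (List.nodup_cons.mp h).2
    constructor
    · intro b hb
      have hbx : b ≠ x := fun e => hx (e ▸ hb)
      rw [List.idxOf_cons_self]
      rw [List.idxOf_cons_ne _ (fun e => hbx e.symm)]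
      omega
    · refine (ih ht).imp_of_mem ?_
      intro a b ha hb hab
      have hax : a ≠ x := fun e => hx (e ▸ ha)
      have hbx : b ≠ x := fun e => hx (e ▸ hb)
      rw [List.idxOf_cons_ne _ (fun e => hax e.symm), List.idxOf_cons_ne _ (fun e => hbx e.symm)]
      omega


lemma mem_occL {low : List String} {s : String} :
    s ∈ occL low ↔ s ∈ SKS ∧ low.any (fun ln => PySem.Str.isIn (unstrip s) ln) := by
  simp only [occL, List.mem_flatMap, List.any_eq_true, mem_blk]
  constructor
  · rintro ⟨ln, hln, hs, hin⟩; exact ⟨hs, ln, hln, hin⟩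
  · rintro ⟨hs, ln, hln, hin⟩; exact ⟨ln, hln, hs, hin⟩


lemma insertBy_perm {α : Type} (bf : α → α → Bool) (x : α) (l : List α) :
    (PySem.List.insertBy bf x l).Perm (x :: l) := by
  induction l with
  | nil => exact List.Perm.refl _
  | cons y ys ih =>
    show (if bf x y then x :: y :: ys else y :: PySem.List.insertBy bf x ys).Perm _
    split_ifs
    · exact List.Perm.refl _
    · exact (ih.cons y).trans (List.Perm.swap x y ys)

lemma foldl_insertBy_perm {α : Type} (bf : α → α → Bool) :
    ∀ (l acc : List α), (l.foldl (fun a x => PySem.List.insertBy bf x a) acc).Perm (acc ++ l) := by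
  intro l
  induction l with
  | nil => intro acc; simp
  | cons x t ih =>
    intro acc
    simp only [List.foldl_cons]
    refine (ih (PySem.List.insertBy bf x acc)).trans ?_
    refine (List.Perm.append_right t (insertBy_perm bf x acc)).trans ?_
    exact (List.perm_middle).symm

lemma uniq_arrangement {α : Type} (R : α → α → Prop) (hasym : ∀ a b, R a b → R b a → False) :
    ∀ (l₁ l₂ : List α), l₁.Perm l₂ → l₁.Pairwise R → l₂.Pairwise R → l₁ = l₂ := by
  intro l₁
  induction l₁ with
  | nil => intro l₂ hp _ _; exact (hp.nil_eq).symm ▸ rfl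
  | cons a t ih =>
    intro l₂ hp h1 h2
    cases l₂ with
    | nil => exact absurd hp.symm (by simp)
    | cons b u =>
      by_cases hab : a = b
      · subst hab
        rw [ih u (hp.cons_inv) h1.tail h2.tail]
      · exfalso
        have ha2 : a ∈ b :: u := hp.mem_iff.mp (List.mem_cons_self)
        have hau : a ∈ u := by cases ha2 with
          | head => exact absurd rfl hab
          | tail _ h => exact h
        have hbt : b ∈ t := by
          have : b ∈ a :: t := hp.symm.mem_iff.mp (List.mem_cons_self)
          cases this with
          | head => exact absurd rfl hab
          | tail _ h => exact h
        exact hasym a b ((List.pairwise_cons.mp h1).1 b hbt) ((List.pairwise_cons.mp h2).1 a hau)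
lemma ins_stable {α : Type} (c : α → Int) (aux : α → Nat) (x : α) :
    ∀ (acc : List α),
      acc.Pairwise (fun p q => c q < c p ∨ (c q = c p ∧ aux p < aux q)) →
      (∀ a ∈ acc, aux a < aux x) →
      (PySem.List.insertBy (fun a b => decide (c b < c a)) x acc).Pairwise
        (fun p q => c q < c p ∨ (c q = c p ∧ aux p < aux q)) := by
  intro acc
  induction acc with
  | nil => intro _ _; exact List.pairwise_singleton _ _
  | cons y ys ih =>
    intro hp hx
    show (if decide (c y < c x) then x :: y :: ys else
        y :: PySem.List.insertBy _ x ys).Pairwise _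
    split_ifs with h
    · have hcy : c y < c x := of_decide_eq_true h
      refine List.Pairwise.cons ?_ hp
      intro b hb
      cases hb with
      | head => exact Or.inl hcy
      | tail _ hb =>
        have := (List.pairwise_cons.mp hp).1 b hb
        rcases this with h' | h' <;> [exact Or.inl (by omega); exact Or.inl (by omega)]
    · have hcy : ¬ c y < c x := of_decide_eq_false (by simpa using h)
      refine List.Pairwise.cons ?_ (ih hp.tail (fun a ha => hx a (List.mem_cons_of_mem _ ha)))
      intro b hb
      rcases (PySem.List.mem_insertBy _ _ _ _).mp hb with rfl | hb
      · by_cases hxy : c b < c y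
        · exact Or.inl hxy
        · exact Or.inr ⟨by omega, hx y List.mem_cons_self⟩
      · exact (List.pairwise_cons.mp hp).1 b hb

lemma stable_sorted_pairwise {α : Type} (c : α → Int) (aux : α → Nat) :
    ∀ (xs acc : List α),
      acc.Pairwise (fun p q => c q < c p ∨ (c q = c p ∧ aux p < aux q)) →
      (∀ a ∈ acc, ∀ x ∈ xs, aux a < aux x) →
      xs.Pairwise (fun a b => aux a < aux b) →
      (xs.foldl (fun acc x => PySem.List.insertBy (fun a b => decide (c b < c a)) x acc)
          acc).Pairwise (fun p q => c q < c p ∨ (c q = c p ∧ aux p < aux q)) := by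
  intro xs
  induction xs with
  | nil => intro acc hp _ _; exact hp
  | cons x t ih =>
    intro acc hp hcross hxs
    simp only [List.foldl_cons]
    refine ih _ (ins_stable c aux x acc hp (fun a ha => hcross a ha x List.mem_cons_self)) ?_ hxs.tail
    intro a ha y hy
    rcases (PySem.List.mem_insertBy _ _ _ _).mp ha with rfl | ha
    · exact (List.pairwise_cons.mp hxs).1 y hy
    · exact hcross a ha y (List.mem_cons_of_mem _ hy)

lemma sorted_rev_stable {α : Type} (c : α → Int) (aux : α → Nat) (xs : List α)
    (h : xs.Pairwise (fun a b => aux a < aux b)) :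
    (PySem.List.sorted xs c true).Pairwise
      (fun p q => c q < c p ∨ (c q = c p ∧ aux p < aux q)) := by
  rw [PySem.List.sorted_rev_eq_foldl_insertBy]
  exact stable_sorted_pairwise c aux xs [] (by simp) (by simp) h
lemma ins_L3 (x : Int × Int × Int × String) :
    ∀ (acc : List (Int × Int × Int × String)),
      acc.Pairwise L3 → (∀ a ∈ acc, a.2.2.1 < x.2.2.1) →
      (PySem.List.insertBy tupLt x acc).Pairwise L3 := by
  intro acc
  induction acc with
  | nil => intro _ _; exact List.pairwise_singleton _ _
  | cons y ys ih =>
    intro hp hj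
    have hjy : y.2.2.1 < x.2.2.1 := hj y List.mem_cons_self
    show (if tupLt x y then x :: y :: ys else y :: PySem.List.insertBy tupLt x ys).Pairwise L3
    split_ifs with h
    · have hxy : L3 x y := by
        unfold tupLt at h; unfold L3
        split_ifs at h <;> omega
      refine List.Pairwise.cons ?_ hp
      intro b hb
      cases hb with
      | head => exact hxy
      | tail _ hb =>
        have hyb := (List.pairwise_cons.mp hp).1 b hb
        unfold L3 at hxy hyb ⊢; omega
    · have hyx : L3 y x := by
        unfold tupLt at h; unfold L3
        split_ifs at h <;> simp_all <;> omega
      refine List.Pairwise.cons ?_ (ih hp.tail (fun a ha => hj a (List.mem_cons_of_mem _ ha)))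
      intro b hb
      rcases (PySem.List.mem_insertBy _ _ _ _).mp hb with rfl | hb
      · exact hyx
      · exact (List.pairwise_cons.mp hp).1 b hb

lemma sortB_pairwise :
    ∀ (xs acc : List (Int × Int × Int × String)),
      acc.Pairwise L3 → (∀ a ∈ acc, ∀ x ∈ xs, a.2.2.1 < x.2.2.1) →
      xs.Pairwise (fun t u => t.2.2.1 < u.2.2.1) →
      (xs.foldl (fun acc x => PySem.List.insertBy tupLt x acc) acc).Pairwise L3 := by
  intro xs
  induction xs with
  | nil => intro acc hp _ _; exact hp
  | cons x t ih =>
    intro acc hp hcross hxs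
    simp only [List.foldl_cons]
    refine ih _ (ins_L3 x acc hp (fun a ha => hcross a ha x List.mem_cons_self)) ?_ hxs.tail
    intro a ha y hy
    rcases (PySem.List.mem_insertBy _ _ _ _).mp ha with rfl | ha
    · exact (List.pairwise_cons.mp hxs).1 y hy
    · exact hcross a ha y (List.mem_cons_of_mem _ hy)
lemma auxN_step (ln : String) (rest : List String) (s : String)
    (h : PySem.Str.isIn (unstrip s) ln = false) :
    auxN (ln :: rest) s = auxN rest s + 25 := by
  unfold auxN
  rw [List.findIdx_cons, h]
  simp; ring

lemma auxN_head (ln : String) (rest : List String) (s : String)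
    (h : PySem.Str.isIn (unstrip s) ln = true) :
    auxN (ln :: rest) s = SKS.idxOf s := by
  unfold auxN
  rw [List.findIdx_cons, h]
  simp

lemma idx_lt_25 {s : String} (h : s ∈ SKS) : SKS.idxOf s < 25 := by
  have := List.idxOf_lt_length_of_mem h
  rwa [sks_len] at this

lemma auxM : ∀ (low : List String),
    (PySem.Set.ofList (occL low)).Pairwise (fun a b => auxN low a < auxN low b) := by
  intro low
  induction low with
  | nil => exact List.Pairwise.nil
  | cons ln rest ih =>
    have hocc : occL (ln :: rest) = blk ln ++ occL rest := rfl
    rw [hocc, PySem.Set.ofList_append, PySem.Set.update_eq_append_filter,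
      PySem.Set.ofList_eq_self_of_nodup _ (blk_nodup ln)]
    have hmemf : ∀ s ∈ (PySem.Set.ofList (occL rest)).filter
        (fun y => !(PySem.Set.contains (blk ln) y)),
        s ∈ SKS ∧ PySem.Str.isIn (unstrip s) ln = false := by
      intro s hs
      rw [List.mem_filter] at hs
      have hs1 : s ∈ occL rest := (PySem.Set.mem_ofList _ _).mp hs.1
      have hsk : s ∈ SKS := (mem_occL.mp hs1).1
      have hnb : s ∉ blk ln := by
        intro hmem
        have hcont := (PySem.Set.contains_iff (blk ln) s).mpr hmem
        rw [hcont] at hs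
        exact absurd hs.2 (by simp)
      refine ⟨hsk, ?_⟩
      by_contra hcon
      exact hnb (mem_blk.mpr ⟨hsk, by simpa using hcon⟩)
    rw [List.pairwise_append]
    refine ⟨?_, ?_, ?_⟩
    · -- within blk ln
      have := (nodup_pairwise_idxOf SKS sks_nodup).filter
        (fun s => PySem.Str.isIn (unstrip s) ln)
      refine this.imp_of_mem ?_
      intro a b ha hb hab
      rw [auxN_head ln rest a (mem_blk.mp ha).2, auxN_head ln rest b (mem_blk.mp hb).2]
      exact hab
    · -- within the rest
      refine (ih.filter _).imp_of_mem ?_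
      intro a b ha hb hab
      rw [auxN_step ln rest a (hmemf a ha).2, auxN_step ln rest b (hmemf b hb).2]
      omega
    · -- across
      intro a ha b hb
      rw [auxN_head ln rest a (mem_blk.mp ha).2, auxN_step ln rest b (hmemf b hb).2]
      have h1 : SKS.idxOf a < 25 := idx_lt_25 (mem_blk.mp ha).1
      omega

lemma cntL (low : List String) (k : String) (hk : k ∈ ERROR_KEYS) :
    (occL low).count (PySem.Str.strip k) = low.countP (fun ln => PySem.Str.isIn k ln) := by
  induction low with
  | nil => rfl
  | cons ln rest ih =>
    have hocc : occL (ln :: rest) = blk ln ++ occL rest := rfl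
    rw [hocc, List.count_append, List.countP_cons, ih]
    have hblk : (blk ln).count (PySem.Str.strip k)
        = if PySem.Str.isIn k ln then 1 else 0 := by
      have hmem : PySem.Str.strip k ∈ blk ln ↔ PySem.Str.isIn k ln = true := by
        rw [mem_blk, unstrip_strip k hk]
        simp [SKS, List.mem_map]
        intro _
        exact ⟨k, hk, rfl⟩
      cases hc : PySem.Str.isIn k ln with
      | true =>
        simp only [if_true]
        exact List.count_eq_one_of_mem (blk_nodup ln) (hmem.mpr hc)
      | false =>
        simp only [Bool.false_eq_true, if_false]
        refine List.count_eq_zero_of_not_mem ?_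
        intro hmm
        rw [hmem] at hmm
        rw [hmm] at hc
        exact Bool.noConfusion hc
      
    rw [hblk]
    cases PySem.Str.isIn k ln <;> simp <;> omega
lemma foldl_if_filter_map {α β σ : Type} (p : α → Bool) (f : α → β) (g : σ → β → σ) :
    ∀ (l : List α) (d : σ),
      l.foldl (fun d k => if p k then g d (f k) else d) d = ((l.filter p).map f).foldl g d := by
  intro l
  induction l with
  | nil => intro d; rfl
  | cons k t ih =>
    intro d
    simp only [List.foldl_cons, List.filter_cons]
    cases hc : p k with
    | true => simp only [if_true, List.map_cons, List.foldl_cons]; exact ih _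
    | false => simp only [Bool.false_eq_true, if_false]; exact ih d

lemma items_A (low : List String) :
    (low.foldl (fun d ln =>
      ERROR_KEYS.foldl (fun d k =>
        if PySem.Str.isIn k ln then
          d.insert (PySem.Str.strip k) (d.getD (PySem.Str.strip k) 0 + 1)
        else d) d) PySem.Dict.empty).items
      = (PySem.Set.ofList (occL low)).map (fun s => (s, ((occL low).count s : Int))) := by
  have hinner : ∀ (d : PySem.Dict String Int) (ln : String),
      ERROR_KEYS.foldl (fun d k =>
        if PySem.Str.isIn k ln then
          d.insert (PySem.Str.strip k) (d.getD (PySem.Str.strip k) 0 + 1)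
        else d) d
      = (blk ln).foldl (fun d s => d.insert s (d.getD s 0 + 1)) d := by
    intro d ln
    rw [foldl_if_filter_map (fun k => PySem.Str.isIn k ln) PySem.Str.strip
      (fun d s => d.insert s (d.getD s 0 + 1)) ERROR_KEYS d, blk_eq]
  have houter : ∀ (lo : List String) (d : PySem.Dict String Int),
      lo.foldl (fun d ln =>
        ERROR_KEYS.foldl (fun d k =>
          if PySem.Str.isIn k ln then
            d.insert (PySem.Str.strip k) (d.getD (PySem.Str.strip k) 0 + 1)
          else d) d) d
      = (occL lo).foldl (fun d s => d.insert s (d.getD s 0 + 1)) d := by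
    intro lo
    induction lo with
    | nil => intro d; rfl
    | cons ln rest ih =>
      intro d
      have hocc : occL (ln :: rest) = blk ln ++ occL rest := rfl
      rw [List.foldl_cons, hinner d ln, hocc, List.foldl_append]
      exact ih _
  rw [houter low PySem.Dict.empty, PySem.Dict.foldl_insert_getD_add_one_eq_counter,
    PySem.Dict.items_counter]

lemma first_hit (p : String → Bool) :
    ∀ (l : List String) (s : Int), l.any p = true →
      (((PySem.List.enumerate l s).filter (fun q => p q.2)).map (fun q => q.1)).getD 0 0
        = s + (l.findIdx p : Int) := by
  intro l
  induction l with
  | nil => intro s h; simp at h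
  | cons x t ih =>
    intro s h
    rw [PySem.List.enumerate_cons]
    simp only [List.filter_cons]
    cases hc : p x with
    | true =>
      simp [List.findIdx_cons, hc]
    | false =>
      have ht : t.any p := by simpa [hc] using h
      simp only [Bool.false_eq_true, if_false]
      rw [ih (s + 1) ht, List.findIdx_cons, hc]
      simp only [cond_false]
      push_cast
      ring

lemma exists_enum_snd {α : Type} (l : List α) (c : α → Bool) (s : Int) :
    (∃ q ∈ PySem.List.enumerate l s, c q.2 = true) ↔ ∃ x ∈ l, c x = true := by
  constructor
  · rintro ⟨q, hq, hcq⟩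
    refine ⟨q.2, ?_, hcq⟩
    rw [← PySem.List.map_snd_enumerate l s]
    exact List.mem_map_of_mem hq
  · rintro ⟨x, hx, hcx⟩
    rw [← PySem.List.map_snd_enumerate l s] at hx
    rcases List.mem_map.mp hx with ⟨q, hq, rfl⟩
    exact ⟨q, hq, hcx⟩

lemma hits_nonempty (low : List String) (k : String) :
    ((((PySem.List.enumerate low).filter (fun p => PySem.Str.isIn k p.2)).map
        (fun p => p.1)).isEmpty = false)
      ↔ low.any (fun ln => PySem.Str.isIn k ln) = true := by
  rw [List.isEmpty_eq_false_iff_exists_mem]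
  simp only [List.mem_map, List.mem_filter, List.any_eq_true]
  constructor
  · rintro ⟨y, q, ⟨hq, hcq⟩, _⟩
    exact (exists_enum_snd low _ 0).mp ⟨q, hq, hcq⟩
  · intro h
    rcases (exists_enum_snd low (fun x => PySem.Str.isIn k x) 0).mpr h with ⟨q, hq, hcq⟩
    exact ⟨q.1, q, ⟨hq, hcq⟩, rfl⟩

lemma cntP_enum (low : List String) (k : String) :
    (PySem.List.enumerate low).countP (fun p => PySem.Str.isIn k p.2)
      = low.countP (fun ln => PySem.Str.isIn k ln) := by
  conv_rhs => rw [← PySem.List.map_snd_enumerate low 0, List.countP_map]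
  rfl

lemma stats_eq (low : List String) :
    (PySem.List.enumerate ERROR_KEYS).foldl (fun st q =>
        if !(((PySem.List.enumerate low).filter (fun p => PySem.Str.isIn q.2 p.2)).map (fun p => p.1)).isEmpty then
          st ++ [(-(PySem.List.len (((PySem.List.enumerate low).filter (fun p => PySem.Str.isIn q.2 p.2)).map (fun p => p.1))),
                  PySem.List.pyGetD (((PySem.List.enumerate low).filter (fun p => PySem.Str.isIn q.2 p.2)).map (fun p => p.1)) 0 0,
                  q.1, PySem.Str.strip q.2)]
        else st) []
    = ((PySem.List.enumerate ERROR_KEYS).filter (fun q => low.any (fun ln => PySem.Str.isIn q.2 ln))).map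
        (fun q => (-(low.countP (fun ln => PySem.Str.isIn q.2 ln) : Int),
                   (low.findIdx (fun ln => PySem.Str.isIn q.2 ln) : Int),
                   q.1, PySem.Str.strip q.2)) := by
  rw [PySem.List.foldl_append_if, List.nil_append]
  rw [List.filter_congr (l := PySem.List.enumerate ERROR_KEYS)
    (q := fun q => low.any (fun ln => PySem.Str.isIn q.2 ln)) (fun q _ => by
      show (!(((PySem.List.enumerate low).filter (fun p => PySem.Str.isIn q.2 p.2)).map (fun p => p.1)).isEmpty)
          = (low.any fun ln => PySem.Str.isIn q.2 ln)
      cases hx : low.any (fun ln => PySem.Str.isIn q.2 ln) with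
      | true =>
        rw [(hits_nonempty low q.2).mpr hx]; rfl
      | false =>
        cases hy : (((PySem.List.enumerate low).filter (fun p => PySem.Str.isIn q.2 p.2)).map (fun p => p.1)).isEmpty with
        | true => rfl
        | false =>
          rw [(hits_nonempty low q.2).mp hy] at hx
          exact Bool.noConfusion hx)]
  refine List.map_congr_left ?_
  intro q hq
  have hany : low.any (fun ln => PySem.Str.isIn q.2 ln) = true := (List.mem_filter.mp hq).2
  have h1 : PySem.List.len (((PySem.List.enumerate low).filter (fun p => PySem.Str.isIn q.2 p.2)).map (fun p => p.1))
      = (low.countP (fun ln => PySem.Str.isIn q.2 ln) : Int) := by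
    rw [PySem.List.len_eq, List.length_map, ← List.countP_eq_length_filter, cntP_enum]
  have h2 : PySem.List.pyGetD (((PySem.List.enumerate low).filter (fun p => PySem.Str.isIn q.2 p.2)).map (fun p => p.1)) 0 0
      = (low.findIdx (fun ln => PySem.Str.isIn q.2 ln) : Int) := by
    rw [PySem.List.pyGetD_zero, first_hit _ low 0 hany]
    ring
  rw [h1, h2]
lemma last_error_eq (lines : List String) :
    (if ((PySem.List.enumerate lines).foldl
        (fun acc p => if PySem.Str.isIn "ERROR" p.2 || PySem.Str.isIn "error" (PySem.Str.lower p.2) then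
            acc ++ ["Line " ++ PySem.Int.toStr (p.1 + 1) ++ ": " ++ p.2] else acc) ([] : List String)).isEmpty
      then ""
      else (PySem.List.pyGet? ((PySem.List.enumerate lines).foldl
        (fun acc p => if PySem.Str.isIn "ERROR" p.2 || PySem.Str.isIn "error" (PySem.Str.lower p.2) then
            acc ++ ["Line " ++ PySem.Int.toStr (p.1 + 1) ++ ": " ++ p.2] else acc) ([] : List String)) (-1)).getD "")
    = (((List.range lines.length).reverse).findSome? (fun (i : Nat) =>
        if PySem.Str.isIn "error" (PySem.List.pyGetD (lines.map PySem.Str.lower) (i : Int) "") then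
          some ("Line " ++ PySem.Int.toStr ((i : Int) + 1) ++ ": " ++ PySem.List.pyGetD lines (i : Int) "")
        else none)).getD "" := by
  rw [lastexpr]
  rw [last_track (fun p => PySem.Str.isIn "ERROR" p.2 || PySem.Str.isIn "error" (PySem.Str.lower p.2))
    (fun p => "Line " ++ PySem.Int.toStr (p.1 + 1) ++ ": " ++ p.2) (PySem.List.enumerate lines) [] ""]
  simp only [cond_eq, List.getLastD_nil]
  rw [findSome?_congr _ (fun (i : Nat) =>
      if PySem.Str.isIn "error" (PySem.Str.lower (lines.getD i "")) then
        some ("Line " ++ PySem.Int.toStr ((i : Int) + 1) ++ ": " ++ lines.getD i "") else none) _ ?side]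
  · exact (revfind (fun s => PySem.Str.isIn "error" (PySem.Str.lower s))
      (fun i s => "Line " ++ PySem.Int.toStr (i + 1) ++ ": " ++ s) lines).symm
  case side =>
    intro i hi
    have hlt : i < lines.length := by simpa using hi
    have h1 : PySem.List.pyGetD (lines.map PySem.Str.lower) (i : Int) ""
        = PySem.Str.lower (lines.getD i "") := by
      rw [PySem.List.pyGetD_natCast]
      rw [List.getD_eq_getElem?_getD, List.getD_eq_getElem?_getD, List.getElem?_map]
      rw [List.getElem?_eq_getElem hlt]
      rfl
    have h2 : PySem.List.pyGetD lines (i : Int) "" = lines.getD i "" := by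
      rw [PySem.List.pyGetD_natCast]
    rw [h1, h2]
def statsR (low : List String) : List (Int × Int × Int × String) :=
  ((PySem.List.enumerate ERROR_KEYS).filter (fun q => low.any (fun ln => PySem.Str.isIn q.2 ln))).map
    (fun q => (-(low.countP (fun ln => PySem.Str.isIn q.2 ln) : Int),
               (low.findIdx (fun ln => PySem.Str.isIn q.2 ln) : Int),
               q.1, PySem.Str.strip q.2))

lemma statsR_mem (low : List String) :
    ∀ t ∈ statsR low, ∃ k, k ∈ ERROR_KEYS ∧
      t = (-(low.countP (fun ln => PySem.Str.isIn k ln) : Int),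
           (low.findIdx (fun ln => PySem.Str.isIn k ln) : Int),
           (SKS.idxOf (PySem.Str.strip k) : Int), PySem.Str.strip k) := by
  intro t ht
  rcases List.mem_map.mp ht with ⟨q, hq, rfl⟩
  have hqe : q ∈ PySem.List.enumerate ERROR_KEYS := (List.mem_filter.mp hq).1
  have hk : q.2 ∈ ERROR_KEYS := by
    rw [← PySem.List.map_snd_enumerate ERROR_KEYS 0]
    exact List.mem_map_of_mem hqe
  refine ⟨q.2, hk, ?_⟩
  rw [idx_strip q hqe]

lemma statsR_pairwise_j (low : List String) :
    (statsR low).Pairwise (fun t u => t.2.2.1 < u.2.2.1) := by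
  unfold statsR
  rw [List.pairwise_map]
  exact (PySem.List.pairwise_lt_enumerate ERROR_KEYS 0).filter _

lemma aux_of_strip (low : List String) (k : String) (hk : k ∈ ERROR_KEYS) :
    auxN low (PySem.Str.strip k)
      = low.findIdx (fun ln => PySem.Str.isIn k ln) * 25 + SKS.idxOf (PySem.Str.strip k) := by
  unfold auxN
  rw [unstrip_strip k hk]

lemma strip_mem_SKS {k : String} (hk : k ∈ ERROR_KEYS) : PySem.Str.strip k ∈ SKS :=
  List.mem_map_of_mem hk

set_option maxHeartbeats 2000000 in
lemma patterns_eq (low : List String) :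
    PySem.List.sorted ((PySem.Set.ofList (occL low)).map
        (fun s => (s, ((occL low).count s : Int)))) (fun x => x.2) true
      = ((statsR low).foldl (fun acc x => PySem.List.insertBy tupLt x acc) []).map projP := by
  have hasym : ∀ (a b : String × Int), Rrel low a b → Rrel low b a → False := by
    intro a b h1 h2
    unfold Rrel at h1 h2
    omega
  apply uniq_arrangement (Rrel low) hasym
  · -- Perm
    refine (PySem.List.sorted_perm _ _ _).trans ?_
    refine List.Perm.trans ?_ ((foldl_insertBy_perm tupLt (statsR low) []).map projP).symm
    rw [List.nil_append]
    -- items ~ (statsR low).map projP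
    have hnd1 : ((PySem.Set.ofList (occL low)).map
        (fun s => (s, ((occL low).count s : Int)))).Nodup := by
      refine (PySem.Set.nodup_ofList _).map ?_
      intro a b hab
      exact congrArg Prod.fst hab
    have hpw : ((statsR low).map projP).Pairwise (· ≠ ·) := by
      unfold statsR
      rw [List.map_map, List.pairwise_map]
      refine ((PySem.List.pairwise_lt_enumerate ERROR_KEYS 0).filter
        (fun q => low.any (fun ln => PySem.Str.isIn q.2 ln))).imp_of_mem ?_
      intro q q' hq hq' hlt heq
      have h1 := idx_strip q (List.mem_filter.mp hq).1
      have h2 := idx_strip q' (List.mem_filter.mp hq').1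
      have : PySem.Str.strip q.2 = PySem.Str.strip q'.2 := congrArg Prod.fst heq
      rw [this] at h1
      omega
    have hnd2 : ((statsR low).map projP).Nodup := hpw
    rw [List.perm_ext_iff_of_nodup hnd1 hnd2]
    intro x
    simp only [List.mem_map, statsR, List.mem_filter, projP]
    constructor
    · rintro ⟨s, hs, rfl⟩
      have hs' : s ∈ occL low := (PySem.Set.mem_ofList _ _).mp hs
      rcases mem_occL.mp hs' with ⟨hsk, hany⟩
      rcases List.mem_map.mp hsk with ⟨k, hk, rfl⟩
      rcases List.mem_map.mp (by rw [← PySem.List.map_snd_enumerate ERROR_KEYS 0] at hk; exact hk)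
        with ⟨q, hq, hq2⟩
      refine ⟨(-(low.countP (fun ln => PySem.Str.isIn q.2 ln) : Int),
               (low.findIdx (fun ln => PySem.Str.isIn q.2 ln) : Int),
               q.1, PySem.Str.strip q.2), ⟨q, ⟨hq, ?_⟩, rfl⟩, ?_⟩
      · have hq2' : q.2 = k := hq2
        rw [hq2']
        rw [unstrip_strip k hk] at hany
        exact hany
      · have hq2' : q.2 = k := hq2
        simp only [hq2', cntL low k hk, neg_neg]
    · rintro ⟨t, ⟨q, ⟨hq, hany⟩, rfl⟩, rfl⟩
      have hk : q.2 ∈ ERROR_KEYS := by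
        rw [← PySem.List.map_snd_enumerate ERROR_KEYS 0]
        exact List.mem_map_of_mem hq
      refine ⟨PySem.Str.strip q.2, ?_, ?_⟩
      · rw [PySem.Set.mem_ofList]
        rw [mem_occL]
        refine ⟨strip_mem_SKS hk, ?_⟩
        rw [unstrip_strip q.2 hk]
        exact hany
      · rw [cntL low q.2 hk]
        simp only [neg_neg]
  · -- Pairwise on A's sorted list
    refine sorted_rev_stable (fun (x : String × Int) => x.2) (fun (p : String × Int) => auxN low p.1) _ ?_
    rw [List.pairwise_map]
    exact auxM low
  · -- Pairwise on B's sorted list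
    rw [List.pairwise_map]
    have hL3 : ((statsR low).foldl (fun acc x => PySem.List.insertBy tupLt x acc) []).Pairwise L3 :=
      sortB_pairwise (statsR low) [] List.Pairwise.nil (by simp) (statsR_pairwise_j low)
    have hmem : ∀ t ∈ (statsR low).foldl (fun acc x => PySem.List.insertBy tupLt x acc) [],
        t ∈ statsR low := by
      intro t ht
      have := (foldl_insertBy_perm tupLt (statsR low) []).mem_iff.mp ht
      simpa using this
    refine hL3.imp_of_mem ?_
    intro t u ht hu hL
    rcases statsR_mem low t (hmem t ht) with ⟨k1, hk1, rfl⟩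
    rcases statsR_mem low u (hmem u hu) with ⟨k2, hk2, rfl⟩
    unfold Rrel projP
    simp only []
    rw [aux_of_strip low k1 hk1, aux_of_strip low k2 hk2]
    have hi1 : SKS.idxOf (PySem.Str.strip k1) < 25 := idx_lt_25 (strip_mem_SKS hk1)
    have hi2 : SKS.idxOf (PySem.Str.strip k2) < 25 := idx_lt_25 (strip_mem_SKS hk2)
    unfold L3 at hL
    simp only [] at hL
    omega
-- ===== VERDICT (by name: the statement is the Claim_ definition above) =====
theorem extract_error_windows_spec : Claim_equal_extract_error_windows := by
  intro text _
  show extract_error_windows text = extract_error_windows_alt text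
  unfold extract_error_windows extract_error_windows_alt summarize_patterns
  dsimp only
  refine Prod.ext ?_ ?_
  · rw [last_error_eq (PySem.Str.splitlines text)]
  · rw [items_A ((PySem.Str.splitlines text).map PySem.Str.lower)]
    rw [stats_eq ((PySem.Str.splitlines text).map PySem.Str.lower)]
    rw [patterns_eq ((PySem.Str.splitlines text).map PySem.Str.lower)]
    rw [← List.map_take, List.map_map]
    rfl
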